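-- pv_equiv track=rewrite | github.com/marcelvdla/advent_of_code_25 | day_2/AoC2.py | split_number_in
-- ===== SOURCE A (Python) =====
-- def split_number_in(n, number):
--     split_length = len(number) // n
--     number_list = []
--     for i in range(n):
--         number_list.append(number[i*split_length:(i+1)*split_length])
--
--     if (len(number_list) > 1):
--         return all([number == number_list[0] for number in number_list])
--     return False
-- ===== SOURCE B (Python) =====
-- def split_number_in(n, number):
--     split_length = len(number) // n
--     if n > 1:
--         return number[:split_length * n] == number[:split_length] * n
--     return False
-- ===== Notes on version B (the rewrite author's own statement) =====
-- stated objective: simpler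
-- what changed: Replaced the block-list building loop and all() scan by a single slice-vs-repeated-first-block equality check (number[:sl*n] == number[:sl]*n).
import Mathlib
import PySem

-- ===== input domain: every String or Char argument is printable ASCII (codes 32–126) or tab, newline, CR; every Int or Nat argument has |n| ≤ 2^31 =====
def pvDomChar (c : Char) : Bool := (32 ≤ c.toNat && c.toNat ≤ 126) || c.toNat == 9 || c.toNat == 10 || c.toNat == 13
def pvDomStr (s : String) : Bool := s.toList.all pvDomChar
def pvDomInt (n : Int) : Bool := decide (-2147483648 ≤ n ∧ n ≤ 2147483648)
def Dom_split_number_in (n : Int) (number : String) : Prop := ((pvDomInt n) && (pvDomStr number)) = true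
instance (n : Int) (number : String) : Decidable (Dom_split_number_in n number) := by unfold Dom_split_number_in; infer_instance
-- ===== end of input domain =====

-- B replaces A's block-list loop + all() by one slice-vs-repeated-first-block comparison (simpler, same cost).

-- ===== PORT A =====
def split_number_in (n : Int) (number : String) : Bool :=
  let split_length := PySem.Int.floordiv (PySem.Str.len number) n
  let number_list := (PySem.List.pyRange 0 n 1).foldl
    (fun acc i =>
      acc ++ [PySem.List.slice number.toList (some (i * split_length)) (some ((i + 1) * split_length))])
    ([] : List (List Char))
  if number_list.length > 1 then
    (number_list.map (fun num => num == PySem.List.pyGetD number_list 0 [])).all id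
  else false

-- ===== PORT B =====
def split_number_in_alt (n : Int) (number : String) : Bool :=
  let split_length := PySem.Int.floordiv (PySem.Str.len number) n
  if n > 1 then
    PySem.List.slice number.toList none (some (split_length * n)) ==
      PySem.List.pyRepeat (PySem.List.slice number.toList none (some split_length)) n
  else false

-- ===== PRECONDITION & SPEC =====
-- Pre_ excludes exactly n = 0, where Python A raises ZeroDivisionError (B raises there too).
def Pre_split_number_in (n : Int) (number : String) : Prop := n ≠ 0
instance (n : Int) (number : String) : Decidable (Pre_split_number_in n number) := by
  unfold Pre_split_number_in; infer_instance

def pvWitness_split_number_in : Int × String := (2, "abab")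

def Spec_split_number_in (n : Int) (number : String) (out : Bool) : Prop := out = split_number_in_alt n number
instance (n : Int) (number : String) (out : Bool) : Decidable (Spec_split_number_in n number out) := by
  unfold Spec_split_number_in; infer_instance

-- ===== CLAIM (what is proved, stated in full; the proofs are below) =====
def Claim_equal_split_number_in : Prop := ∀ (n : Int) (number : String), Dom_split_number_in n number → Pre_split_number_in n number → Spec_split_number_in n number (split_number_in n number)

-- ===== LEMMAS AND PROOFS =====

-- Core fact: the (m·s)-prefix equals the first s-block repeated m times iff every s-block equals the first.
lemma blocks_iff (m s : Nat) (cs : List Char) (hm : 1 ≤ m) (h : m * s ≤ cs.length) :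
    cs.take (m * s) = (List.replicate m (cs.take s)).flatten ↔
      ∀ k, k < m → (cs.drop (k * s)).take s = cs.take s := by
  have hs : s ≤ cs.length := le_trans (Nat.le_mul_of_pos_left s hm) h
  have hlen : (cs.take s).length = s := by simp [Nat.min_eq_left hs]
  constructor
  · intro E k hk
    have hsplit : (List.replicate m (cs.take s)).flatten
        = (List.replicate k (cs.take s)).flatten ++ (List.replicate (m - k) (cs.take s)).flatten := by
      rw [← List.flatten_append, ← List.replicate_add, Nat.add_sub_cancel' (Nat.le_of_lt hk)]
    have hklen : ((List.replicate k (cs.take s)).flatten).length = k * s := by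
      simp [hlen, Nat.mul_comm]
    -- drop k*s then take s on both sides of E
    have E' := congrArg (fun l => (l.drop (k * s)).take s) E
    simp only at E'
    have hL : ((cs.take (m * s)).drop (k * s)).take s = (cs.drop (k * s)).take s := by
      rw [List.drop_take, List.take_take]
      congr 1
      have h1 : (k + 1) * s = k * s + s := by ring
      have h2 : (k + 1) * s ≤ m * s := Nat.mul_le_mul_right s hk
      omega
    obtain ⟨j, hj⟩ : ∃ j, m - k = j + 1 := ⟨m - k - 1, by omega⟩
    have hR : (((List.replicate m (cs.take s)).flatten).drop (k * s)).take s = cs.take s := by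
      rw [hsplit, ← hklen, List.drop_left, hj, List.replicate_succ, List.flatten_cons,
        List.take_left' hlen]
    rw [hL, hR] at E'
    exact E'
  · intro H
    induction m with
    | zero => omega
    | succ m ih =>
      by_cases hm0 : m = 0
      · subst hm0
        simp
      · have hmle : m * s ≤ cs.length := by
          have h1 : m * s ≤ (m + 1) * s := Nat.mul_le_mul_right s (by omega)
          omega
        have ihh := ih (by omega) hmle (fun k hk => H k (by omega))
        have hadd : (m + 1) * s = m * s + s := by ring
        rw [hadd, List.take_add, ihh, List.replicate_succ', List.flatten_append]
        congr 1
        simp only [List.flatten_cons, List.flatten_nil, List.append_nil]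
        exact H m (by omega)

-- A's foldl-built list of slices is the map of blocks over range n.toNat (n ≥ 2, s = len / n).
lemma portA_blocks (m s : Nat) (cs : List Char) :
    (PySem.List.pyRange 0 (m : Int) 1).foldl
      (fun acc i => acc ++ [PySem.List.slice cs (some (i * (s : Int))) (some ((i + 1) * (s : Int)))])
      ([] : List (List Char))
      = (List.range m).map (fun k => (cs.drop (k * s)).take s) := by
  rw [PySem.List.pyRange_zero, List.foldl_map, PySem.List.foldl_append_singleton_eq_map,
    List.nil_append]
  apply List.map_congr_left
  intro k _
  have h1 : ((k : Int)) * (s : Int) = ((k * s : Nat) : Int) := by push_cast; ring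
  have h2 : ((k : Int) + 1) * (s : Int) = ((k * s + s : Nat) : Int) := by push_cast; ring
  rw [h1, h2, PySem.List.slice_natCast]
  congr 1
  omega

-- ===== VERDICT (by name: the statement is the Claim_ definition above) =====
theorem split_number_in_spec : Claim_equal_split_number_in := by
  intro n number _ hpre
  unfold Spec_split_number_in split_number_in split_number_in_alt
  simp only [PySem.Str.len_eq]
  by_cases hn2 : n > 1
  · -- n >= 2
    obtain ⟨m, hm⟩ : ∃ m : Nat, n = (m : Int) := ⟨n.toNat, by omega⟩
    have hm2 : 2 ≤ m := by omega
    subst hm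
    rw [PySem.Int.floordiv_natCast]
    set cs := number.toList with hcs
    set s := cs.length / m with hs
    have hms : m * s ≤ cs.length := by
      have := Nat.div_mul_le_self cs.length m
      calc m * s = cs.length / m * m := by rw [hs]; ring
        _ ≤ cs.length := this
    rw [portA_blocks m s cs]
    have hlen : ((List.range m).map (fun k => (cs.drop (k * s)).take s)).length = m := by simp
    rw [if_pos (by rw [hlen]; omega), if_pos hn2]
    -- head of the block list
    obtain ⟨m', hm'⟩ : ∃ m', m = m' + 1 := ⟨m - 1, by omega⟩
    have hhead : PySem.List.pyGetD ((List.range m).map (fun k => (cs.drop (k * s)).take s)) 0 [] = cs.take s := by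
      rw [hm', List.range_succ_eq_map, List.map_cons, PySem.List.pyGetD_zero_cons]
      simp
    rw [hhead]
    -- B side slices
    have hb1 : ((s : Int)) * (m : Int) = ((s * m : Nat) : Int) := by push_cast; ring
    rw [hb1, PySem.List.slice_to_natCast, PySem.List.slice_to_natCast]
    have hrep : PySem.List.pyRepeat (cs.take s) ((m : Nat) : Int)
        = (List.replicate m (cs.take s)).flatten := by
      simp [PySem.List.pyRepeat]
    rw [hrep]
    rw [Bool.eq_iff_iff]
    simp only [List.all_eq_true, List.mem_map, List.mem_range, id_eq, beq_iff_eq,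
      forall_exists_index, and_imp, forall_apply_eq_imp_iff₂]
    have := blocks_iff m s cs (by omega) hms
    rw [Nat.mul_comm s m]
    constructor
    · intro H
      exact this.mpr (fun k hk => H k hk)
    · intro H k hk
      exact this.mp H k hk
  · -- n < 0 or n = 1: both sides are false
    rw [if_neg hn2]
    have ht : n.toNat = 0 ∨ n.toNat = 1 := by omega
    rw [PySem.List.pyRange_zero, List.foldl_map, PySem.List.foldl_append_singleton_eq_map]
    rcases ht with h | h <;> rw [h] <;> simp
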